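-- pv_equiv track=rewrite | github.com/xelamonster/aoc2023 | day1/calibration2.py | get_last_digit
-- ===== SOURCE A (Python) =====
-- digits = "123456789"
--
-- numbers = ["one", "two", "three", "four", "five", "six", "seven", "eight", "nine"]
--
-- def get_last_digit(line):
--     numbers_indexes = [(line.rfind(n), digits[i]) for i, n in enumerate(numbers)]
--     numbers_indexes.sort(key=lambda n: n[0], reverse=True)
--     digits_indexes = [(line.rfind(d), d) for d in digits]
--     digits_indexes.sort(key=lambda d: d[0], reverse=True)
--     if len(numbers_indexes) > 0 and numbers_indexes[0][0] > digits_indexes[0][0]: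
--         return numbers_indexes[0][1]
--     return digits_indexes[0][1]
-- ===== SOURCE B (Python) =====
-- digits = "123456789"
--
-- numbers = ["one", "two", "three", "four", "five", "six", "seven", "eight", "nine"]
--
-- def get_last_digit(line):
--     # single reverse scan; the trailing "1" reproduces A's value on lines
--     # with no digit or digit-word (A's sorted default)
--     for i in range(len(line) - 1, -1, -1):
--         if line[i] in digits:
--             return line[i]
--         for w, d in zip(numbers, digits):
--             if line.startswith(w, i):
--                 return d
--     return "1"
-- ===== Notes on version B (the rewrite author's own statement) =====
-- stated objective: simpler
-- what changed: Replaced 18 whole-line rfind calls plus two reverse sorts by a single right-to-left scan that returns at the first position holding a digit or a spelled-out number word (digit checked before word at the same position, matching A's strict-greater tie rule); the scan's fallback return value reproduces A's no-match default.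
import Mathlib
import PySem

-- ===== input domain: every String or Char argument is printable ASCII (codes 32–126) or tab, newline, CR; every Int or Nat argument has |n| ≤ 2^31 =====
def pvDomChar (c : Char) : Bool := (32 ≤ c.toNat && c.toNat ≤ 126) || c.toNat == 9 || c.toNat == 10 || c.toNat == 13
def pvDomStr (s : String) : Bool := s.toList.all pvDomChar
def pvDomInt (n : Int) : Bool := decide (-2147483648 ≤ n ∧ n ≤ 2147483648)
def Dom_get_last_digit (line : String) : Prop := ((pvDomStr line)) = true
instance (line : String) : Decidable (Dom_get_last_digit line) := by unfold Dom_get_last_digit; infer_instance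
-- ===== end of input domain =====

-- B replaces A's 18 rfind calls plus two sorts by a single right-to-left scan that
-- returns at the first (i.e. rightmost) digit or digit-word; same return value, simpler.

-- ===== PORT A =====
def pyDigits : String := "123456789"

def pyNumbers : List String := ["one", "two", "three", "four", "five", "six", "seven", "eight", "nine"]

def get_last_digit (line : String) : String :=
  -- digits[i]: i ranges over 0..8 from enumerate, always in range, so getD's default is never used
  let numbers_indexes :=
    (PySem.List.enumerate pyNumbers).map
      (fun p => (PySem.Str.rfind line p.2, String.mk [(PySem.Str.pyGet? pyDigits p.1).getD ' ']))
  let numbers_indexes := PySem.List.sorted numbers_indexes (fun q => q.1) (reverse := true)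
  let digits_indexes :=
    pyDigits.toList.map (fun d => (PySem.Str.rfind line (String.mk [d]), String.mk [d]))
  let digits_indexes := PySem.List.sorted digits_indexes (fun q => q.1) (reverse := true)
  -- both lists have 9 elements, so [0] never raises and headD's default is never used
  if numbers_indexes.length > 0 ∧ (numbers_indexes.headD (0, "")).1 > (digits_indexes.headD (0, "")).1 then
    (numbers_indexes.headD (0, "")).2
  else
    (digits_indexes.headD (0, "")).2

-- ===== PORT B =====
-- zip(numbers, digits) of Source B, written out as the literal pair list
def pvWords : List (List Char × Char) :=
  [("one".toList, '1'), ("two".toList, '2'), ("three".toList, '3'), ("four".toList, '4'),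
   ("five".toList, '5'), ("six".toList, '6'), ("seven".toList, '7'), ("eight".toList, '8'),
   ("nine".toList, '9')]

-- the body of Source B's loop at position i: line[i] is always in range when called from the
-- scan, so the guard only makes the indexing total; startswith(w, i) is w <+: drop i (exact
-- for 0 ≤ i ≤ len(line)); the inner for/return is find? over the pair list
def pvCheckAt (l : List Char) (i : Nat) : Option Char :=
  if h : i < l.length then
    if pyDigits.toList.contains l[i] then some l[i]
    else (pvWords.find? (fun p => p.1.isPrefixOf (l.drop i))).map (fun p => p.2)
  else none

-- for i in range(len(line)-1, -1, -1): bGo l (j) scans positions j-1, j-2, …, 0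
def pvBGo (l : List Char) : Nat → String
  | 0 => "1"
  | j + 1 =>
    match pvCheckAt l j with
    | some c => String.mk [c]
    | none => pvBGo l j

def get_last_digit_alt (line : String) : String :=
  pvBGo line.toList line.toList.length

-- ===== PRECONDITION & SPEC =====
def Spec_get_last_digit (line : String) (out : String) : Prop := out = get_last_digit_alt line
instance (line : String) (out : String) : Decidable (Spec_get_last_digit line out) := by unfold Spec_get_last_digit; infer_instance

-- ===== CLAIM (what is proved, stated in full; the proofs are below) =====
def Claim_equal_get_last_digit : Prop := ∀ (line : String), Dom_get_last_digit line → Spec_get_last_digit line (get_last_digit line)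

-- ===== LEMMAS AND PROOFS =====

-- [c] is a prefix exactly when the head is c
theorem pv_single_prefix_iff (c : Char) (xs : List Char) : [c] <+: xs ↔ xs.head? = some c := by
  cases xs with
  | nil => simp
  | cons a t =>
    constructor
    · rintro ⟨u, hu⟩
      simp at hu
      simp [hu.1]
    · intro h
      simp at h
      exact ⟨t, by simp [h]⟩

-- characterisation of PySem's rfind search loop
theorem pv_go_zero (l sub : List Char) :
    PySem.Chars.rfind.go l sub 0 = if sub.isPrefixOf l then 0 else -1 := rfl

theorem pv_go_succ (l sub : List Char) (j : Nat) :
    PySem.Chars.rfind.go l sub (j + 1) =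
      if sub.isPrefixOf (l.drop (j + 1)) then ((j : Int) + 1) else PySem.Chars.rfind.go l sub j := rfl

theorem pv_go_neg_iff (l sub : List Char) (j : Nat) :
    PySem.Chars.rfind.go l sub j = -1 ↔ ∀ i ≤ j, ¬ sub <+: l.drop i := by
  induction j with
  | zero =>
    rw [pv_go_zero]
    split_ifs with hp
    · simp [List.isPrefixOf_iff_prefix] at hp
      constructor
      · intro h; exact absurd h (by decide)
      · intro h; exact absurd hp (by simpa using h 0 (by omega))
    · simp [List.isPrefixOf_iff_prefix] at hp
      constructor
      · intro _ i hi
        interval_cases i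
        simpa using hp
      · intro _; rfl
  | succ j ih =>
    rw [pv_go_succ]
    split_ifs with hp
    · rw [List.isPrefixOf_iff_prefix] at hp
      constructor
      · intro h; exact absurd h (by omega)
      · intro h; exact absurd hp (h (j + 1) (by omega))
    · rw [List.isPrefixOf_iff_prefix] at hp
      rw [ih]
      constructor
      · intro h i hi
        rcases Nat.lt_or_ge i (j + 1) with hlt | hge
        · exact h i (by omega)
        · have : i = j + 1 := by omega
          subst this; exact hp
      · intro h i hi
        exact h i (by omega)

theorem pv_go_spec (l sub : List Char) (j : Nat) (h : PySem.Chars.rfind.go l sub j ≠ -1) :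
    ∃ k ≤ j, PySem.Chars.rfind.go l sub j = (k : Int) ∧ sub <+: l.drop k ∧
      ∀ i, k < i → i ≤ j → ¬ sub <+: l.drop i := by
  induction j with
  | zero =>
    rw [pv_go_zero] at h ⊢
    split_ifs at h ⊢ with hp
    · rw [List.isPrefixOf_iff_prefix] at hp
      exact ⟨0, le_refl 0, rfl, by simpa using hp, fun i hi hij => by omega⟩
    · exact absurd rfl h
  | succ j ih =>
    rw [pv_go_succ] at h ⊢
    split_ifs at h ⊢ with hp
    · rw [List.isPrefixOf_iff_prefix] at hp
      exact ⟨j + 1, le_refl _, by push_cast; ring, hp, fun i hi hij => by omega⟩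
    · rw [List.isPrefixOf_iff_prefix] at hp
      obtain ⟨k, hk, he, hm, ha⟩ := ih h
      refine ⟨k, by omega, he, hm, fun i hi hij => ?_⟩
      rcases Nat.lt_or_ge i (j + 1) with hlt | hge
      · exact ha i hi (by omega)
      · have : i = j + 1 := by omega
        subst this; exact hp

theorem pv_no_match_past (l sub : List Char) (hs : sub ≠ []) {i : Nat} (h : l.length < i) :
    ¬ sub <+: l.drop i := by
  intro hp
  rw [List.drop_eq_nil_of_le (le_of_lt h)] at hp
  exact hs (List.prefix_nil.mp hp)

theorem pv_rfind_neg (l sub : List Char) (hs : sub ≠ []) (h : PySem.Chars.rfind l sub = -1) :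
    ∀ i, ¬ sub <+: l.drop i := by
  intro i
  by_cases hi : i ≤ l.length
  · exact (pv_go_neg_iff l sub l.length).mp h i hi
  · exact pv_no_match_past l sub hs (by omega)

theorem pv_rfind_spec (l sub : List Char) (hs : sub ≠ []) (h : PySem.Chars.rfind l sub ≠ -1) :
    ∃ k : Nat, PySem.Chars.rfind l sub = (k : Int) ∧ sub <+: l.drop k ∧
      ∀ i : Nat, k < i → ¬ sub <+: l.drop i := by
  obtain ⟨k, hk, he, hm, ha⟩ := pv_go_spec l sub l.length h
  refine ⟨k, he, hm, fun i hi => ?_⟩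
  by_cases hil : i ≤ l.length
  · exact ha i hi hil
  · exact pv_no_match_past l sub hs (by omega)

theorem pv_rfind_ge_neg_one (l sub : List Char) : -1 ≤ PySem.Chars.rfind l sub := by
  by_cases h : PySem.Chars.rfind l sub = -1
  · omega
  · obtain ⟨k, -, he, -, -⟩ := pv_go_spec l sub l.length h
    show -1 ≤ PySem.Chars.rfind.go l sub l.length
    omega

theorem pv_rfind_ge_of_match (l sub : List Char) (hs : sub ≠ []) {i : Nat}
    (h : sub <+: l.drop i) : (i : Int) ≤ PySem.Chars.rfind l sub := by
  by_cases hn : PySem.Chars.rfind l sub = -1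
  · exact absurd h (pv_rfind_neg l sub hs hn i)
  · obtain ⟨k, he, -, ha⟩ := pv_rfind_spec l sub hs hn
    rw [he]
    by_contra hc
    exact ha i (by omega) h

theorem pv_words_nonnil : ∀ p ∈ pvWords, p.1 ≠ [] := by decide

theorem pv_words_no_prefix : ∀ p ∈ pvWords, ∀ q ∈ pvWords, p.1 <+: q.1 → p = q := by decide

-- pvCheckAt returns none exactly when neither a digit nor a word matches at i
theorem pv_checkAt_none_iff (l : List Char) (i : Nat) :
    pvCheckAt l i = none ↔
      (∀ d ∈ pyDigits.toList, ¬ [d] <+: l.drop i) ∧ (∀ p ∈ pvWords, ¬ p.1 <+: l.drop i) := by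
  have hdrop : ∀ c : Char, [c] <+: l.drop i ↔ l[i]? = some c := by
    intro c; rw [pv_single_prefix_iff, List.head?_drop]
  unfold pvCheckAt
  split_ifs with h hc
  · constructor
    · intro he; exact absurd he (by simp)
    · rintro ⟨hd, -⟩
      have hmem : l[i] ∈ pyDigits.toList := by simpa using hc
      have hpre : [l[i]] <+: l.drop i := (hdrop l[i]).mpr (by simp [List.getElem?_eq_getElem h])
      exact absurd hpre (hd _ hmem)
  · rw [Option.map_eq_none_iff, List.find?_eq_none]
    constructor
    · intro hw
      refine ⟨fun d hdm hpre => ?_, fun p hp hpre => ?_⟩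
      · have hde : l[i]? = some d := (hdrop d).mp hpre
        have : l[i] = d := by simpa [List.getElem?_eq_getElem h] using hde
        subst this
        exact hc (by simpa using hdm)
      · exact hw p hp (List.isPrefixOf_iff_prefix.mpr hpre)
    · rintro ⟨-, hw⟩ p hp hpre
      exact hw p hp (List.isPrefixOf_iff_prefix.mp hpre)
  · rw [List.drop_eq_nil_of_le (Nat.le_of_not_lt h)]
    constructor
    · intro _
      refine ⟨fun d _ hpre => ?_, fun p hp hpre => ?_⟩
      · simp at hpre
      · exact pv_words_nonnil p hp (List.prefix_nil.mp hpre)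
    · intro _; rfl

theorem pv_bGo_none (l : List Char) (j : Nat) (h : ∀ i < j, pvCheckAt l i = none) :
    pvBGo l j = "1" := by
  induction j with
  | zero => rfl
  | succ j ih =>
    have hj := h j (by omega)
    simp only [pvBGo, hj]
    exact ih (fun i hi => h i (by omega))

theorem pv_bGo_hit (l : List Char) (j k : Nat) (c : Char) (hk : k < j)
    (hc : pvCheckAt l k = some c) (h : ∀ i, k < i → i < j → pvCheckAt l i = none) :
    pvBGo l j = String.mk [c] := by
  induction j with
  | zero => omega
  | succ j ih =>
    by_cases hkj : k = j
    · subst hkj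
      simp [pvBGo, hc]
    · have hjn := h j (by omega) (by omega)
      simp only [pvBGo, hjn]
      exact ih (by omega) (fun i hi hij => h i hi (by omega))

theorem pv_toList_mk (cs : List Char) : (String.mk cs).toList = cs :=
  (String.ofList_eq.mp rfl).symm

theorem pv_main (line : String) : get_last_digit line = get_last_digit_alt line := by
  have hdrop : ∀ (l : List Char) (i : Nat) (c : Char), [c] <+: l.drop i ↔ l[i]? = some c := by
    intro l i c; rw [pv_single_prefix_iff, List.head?_drop]
  set l := line.toList with hl
  set N0 := pvWords.map (fun p => (PySem.Chars.rfind l p.1, String.mk [p.2])) with hN0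
  set D0 := pyDigits.toList.map (fun d => (PySem.Chars.rfind l [d], String.mk [d])) with hD0
  have e2 : pyDigits.toList.map (fun d => (PySem.Str.rfind line (String.mk [d]), String.mk [d])) = D0 := by
    rw [hD0]
    apply List.map_congr_left
    intro d _
    rw [PySem.Str.rfind_eq, pv_toList_mk]
  have e1 : (PySem.List.enumerate pyNumbers).map
      (fun p => (PySem.Str.rfind line p.2, String.mk [(PySem.Str.pyGet? pyDigits p.1).getD ' '])) = N0 := rfl
  have hB : get_last_digit_alt line = pvBGo l l.length := rfl
  have hNne : PySem.List.sorted N0 (fun q => q.1) true ≠ [] := by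
    rw [Ne, PySem.List.sorted_eq_nil_iff, hN0]
    simp [pvWords]
  have hDne : PySem.List.sorted D0 (fun q => q.1) true ≠ [] := by
    rw [Ne, PySem.List.sorted_eq_nil_iff, hD0]
    simp [pyDigits]
  obtain ⟨mN, tN, hNs⟩ := List.exists_cons_of_ne_nil hNne
  obtain ⟨mD, tD, hDs⟩ := List.exists_cons_of_ne_nil hDne
  have hA : get_last_digit line = if (mN :: tN).length > 0 ∧ mN.1 > mD.1 then mN.2 else mD.2 := by
    simp only [get_last_digit, e1, e2, hNs, hDs, List.headD_cons]
  have hmNmem : mN ∈ N0 := (PySem.List.sorted_perm N0 (fun q => q.1) true).subset (by rw [hNs]; exact List.mem_cons_self)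
  have hmDmem : mD ∈ D0 := (PySem.List.sorted_perm D0 (fun q => q.1) true).subset (by rw [hDs]; exact List.mem_cons_self)
  obtain ⟨q, hq, hqe⟩ := List.mem_map.mp hmNmem
  obtain ⟨dq, hdq, hde⟩ := List.mem_map.mp hmDmem
  have hNmax : ∀ p ∈ pvWords, PySem.Chars.rfind l p.1 ≤ mN.1 := fun p hp =>
    PySem.List.key_head_sorted_rev_ge N0 (fun q => q.1) hNs _ (List.mem_map_of_mem hp)
  have hDmax : ∀ d ∈ pyDigits.toList, PySem.Chars.rfind l [d] ≤ mD.1 := fun d hd =>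
    PySem.List.key_head_sorted_rev_ge D0 (fun q => q.1) hDs _ (List.mem_map_of_mem hd)
  have hq1 : mN.1 = PySem.Chars.rfind l q.1 := by rw [← hqe]
  have hq2 : mN.2 = String.mk [q.2] := by rw [← hqe]
  have hd1 : mD.1 = PySem.Chars.rfind l [dq] := by rw [← hde]
  have hd2 : mD.2 = String.mk [dq] := by rw [← hde]
  have hDge : -1 ≤ mD.1 := by rw [hd1]; exact pv_rfind_ge_neg_one l [dq]
  rw [hA, hB]
  by_cases hgt : mN.1 > mD.1
  · -- a digit-word occurs strictly later than every numeral digit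
    rw [if_pos ⟨by simp, hgt⟩]
    have hne : PySem.Chars.rfind l q.1 ≠ -1 := by rw [← hq1]; omega
    obtain ⟨k, hke, hkm, hka⟩ := pv_rfind_spec l q.1 (pv_words_nonnil q hq) hne
    have hkN : (k : Int) = mN.1 := by rw [hq1, hke]
    have hklen : k < l.length := by
      rcases Nat.lt_or_ge k l.length with h | h
      · exact h
      · rw [List.drop_eq_nil_of_le h] at hkm
        exact absurd (List.prefix_nil.mp hkm) (pv_words_nonnil q hq)
    have habove : ∀ i : Nat, k < i → pvCheckAt l i = none := by
      intro i hi
      rw [pv_checkAt_none_iff]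
      refine ⟨fun d hd hpre => ?_, fun p hp hpre => ?_⟩
      · have h1 := pv_rfind_ge_of_match l [d] (by simp) hpre
        have h2 := hDmax d hd
        omega
      · have h1 := pv_rfind_ge_of_match l p.1 (pv_words_nonnil p hp) hpre
        have h2 := hNmax p hp
        omega
    have hdigF : ¬ pyDigits.toList.contains (l[k]'hklen) = true := by
      intro hc
      have hmem : l[k] ∈ pyDigits.toList := by simpa using hc
      have hpre : [l[k]] <+: l.drop k := (hdrop l k l[k]).mpr (by simp [List.getElem?_eq_getElem hklen])
      have h1 := pv_rfind_ge_of_match l [l[k]] (by simp) hpre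
      have h2 := hDmax _ hmem
      omega
    have hfind : pvWords.find? (fun p => p.1.isPrefixOf (l.drop k)) = some q := by
      cases hf : pvWords.find? (fun p => p.1.isPrefixOf (l.drop k)) with
      | none =>
        rw [List.find?_eq_none] at hf
        exact absurd (List.isPrefixOf_iff_prefix.mpr hkm) (hf q hq)
      | some p =>
        have hpm := List.mem_of_find?_eq_some hf
        have hpt := List.find?_some (p := fun p : List Char × Char => p.1.isPrefixOf (l.drop k)) hf
        have hppre := List.isPrefixOf_iff_prefix.mp hpt
        rcases List.prefix_or_prefix_of_prefix hppre hkm with h | h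
        · rw [pv_words_no_prefix p hpm q hq h]
        · rw [← pv_words_no_prefix q hq p hpm h]
    have hck : pvCheckAt l k = some q.2 := by
      unfold pvCheckAt
      rw [dif_pos hklen, if_neg hdigF, hfind]
      rfl
    rw [pv_bGo_hit l l.length k q.2 hklen hck (fun i hi _ => habove i hi), hq2]
  · rw [if_neg (fun h => hgt h.2)]
    have hNle : mN.1 ≤ mD.1 := by omega
    by_cases hneg : mD.1 = -1
    · -- no digit and no digit-word anywhere: both return "1"
      have hnoD : ∀ d ∈ pyDigits.toList, PySem.Chars.rfind l [d] = -1 := by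
        intro d hd
        have h1 := hDmax d hd
        have h2 := pv_rfind_ge_neg_one l [d]
        omega
      have hnoW : ∀ p ∈ pvWords, PySem.Chars.rfind l p.1 = -1 := by
        intro p hp
        have h1 := hNmax p hp
        have h2 := pv_rfind_ge_neg_one l p.1
        omega
      have hnone : ∀ i : Nat, pvCheckAt l i = none := by
        intro i
        rw [pv_checkAt_none_iff]
        refine ⟨fun d hd hpre => ?_, fun p hp hpre => ?_⟩
        · have h1 := pv_rfind_ge_of_match l [d] (by simp) hpre
          rw [hnoD d hd] at h1
          omega
        · have h1 := pv_rfind_ge_of_match l p.1 (pv_words_nonnil p hp) hpre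
          rw [hnoW p hp] at h1
          omega
      rw [pv_bGo_none l l.length (fun i _ => hnone i)]
      have hallD : ∀ y ∈ D0, (fun q : Int × String => q.1) y = -1 := by
        intro y hy
        obtain ⟨d, hd, hyd⟩ := List.mem_map.mp hy
        rw [← hyd]
        exact hnoD d hd
      have hsid : PySem.List.sorted D0 (fun q => q.1) true = D0 :=
        PySem.List.sorted_rev_eq_self_of_pairwise D0 (fun q => q.1)
          (List.pairwise_of_forall_mem_list (fun a ha b hb => by
            rw [hallD a ha, hallD b hb]))
      have hcons : mD :: tD = D0 := by rw [← hDs, hsid]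
      have hhead : D0.head? = some (PySem.Chars.rfind l ['1'], String.mk ['1']) := rfl
      rw [← hcons] at hhead
      simp only [List.head?_cons, Option.some.injEq] at hhead
      rw [hhead]
      rfl
    · -- the rightmost match is a numeral digit
      have hne : PySem.Chars.rfind l [dq] ≠ -1 := by rw [← hd1]; exact hneg
      obtain ⟨k, hke, hkm, hka⟩ := pv_rfind_spec l [dq] (by simp) hne
      have hkD : (k : Int) = mD.1 := by rw [hd1, hke]
      have hklen : k < l.length := by
        rcases Nat.lt_or_ge k l.length with h | h
        · exact h
        · rw [List.drop_eq_nil_of_le h] at hkm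
          simp at hkm
      have hlk : l[k] = dq := by
        have := (hdrop l k dq).mp hkm
        simpa [List.getElem?_eq_getElem hklen] using this
      have habove : ∀ i : Nat, k < i → pvCheckAt l i = none := by
        intro i hi
        rw [pv_checkAt_none_iff]
        refine ⟨fun d hd hpre => ?_, fun p hp hpre => ?_⟩
        · have h1 := pv_rfind_ge_of_match l [d] (by simp) hpre
          have h2 := hDmax d hd
          omega
        · have h1 := pv_rfind_ge_of_match l p.1 (pv_words_nonnil p hp) hpre
          have h2 := hNmax p hp
          omega
      have hck : pvCheckAt l k = some l[k] := by
        unfold pvCheckAt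
        rw [dif_pos hklen, if_pos (by rw [hlk]; simpa using hdq)]
      rw [pv_bGo_hit l l.length k l[k] hklen hck (fun i hi _ => habove i hi), hd2, hlk]

-- ===== VERDICT (by name: the statement is the Claim_ definition above) =====
theorem get_last_digit_spec : Claim_equal_get_last_digit := by
  intro line _
  exact pv_main line
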